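-- pv_equiv track=rewrite | github.com/Ravishka17/AskLab-AI-Bot | test_searching_display.py | convert_to_past_tense
-- ===== SOURCE A (Python) =====
-- def convert_to_past_tense(sections):
--     """Convert action verbs to past tense in completed reasoning."""
--     converted = []
--     for section in sections:
--         section = section.replace("**Searching Wikipedia...**", "**Searched Wikipedia**")
--         section = section.replace("**Searching...**", "**Searched**")
--         section = section.replace("**Reading Article...**", "**Read Article**")
--         section = section.replace("**Reading...**", "**Read Article**")
--         section = section.replace("**Searching Memory...**", "**Searched Memory**")
--         section = section.replace("**Thinking...**", "**Thought**")
--         section = section.replace("**Skipping Duplicate**", "**Skipped Duplicate**")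
--         converted.append(section)
--     return converted
-- ===== SOURCE B (Python) =====
-- # Single tokenization on the "**" marker + one dict lookup per token,
-- # instead of seven sequential full-string replace passes.
-- _PAST = {
--     "Searching Wikipedia...": "Searched Wikipedia",
--     "Searching...": "Searched",
--     "Reading Article...": "Read Article",
--     "Reading...": "Read Article",
--     "Searching Memory...": "Searched Memory",
--     "Thinking...": "Thought",
--     "Skipping Duplicate": "Skipped Duplicate",
-- }
--
--
-- def convert_to_past_tense(sections):
--     """Convert action verbs to past tense in completed reasoning."""
--     converted = []
--     for section in sections:
--         parts = section.split("**")
--         head, rest = parts[0], parts[1:]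
--         if rest:
--             rest = [_PAST.get(t, t) for t in rest[:-1]] + rest[-1:]
--         converted.append("**".join([head] + rest))
--     return converted
-- ===== Notes on version B (the rewrite author's own statement) =====
-- stated objective: alternative
-- what changed: B splits each section on the '**' marker once and maps every interior token through a dict of past-tense phrases, instead of A's seven sequential full-string replace passes.
-- outside the precondition, e.g. on convert_to_past_tense(['***Searching...**']): A returns ['***Searched**'], B returns ['***Searching...**']
import Mathlib
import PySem

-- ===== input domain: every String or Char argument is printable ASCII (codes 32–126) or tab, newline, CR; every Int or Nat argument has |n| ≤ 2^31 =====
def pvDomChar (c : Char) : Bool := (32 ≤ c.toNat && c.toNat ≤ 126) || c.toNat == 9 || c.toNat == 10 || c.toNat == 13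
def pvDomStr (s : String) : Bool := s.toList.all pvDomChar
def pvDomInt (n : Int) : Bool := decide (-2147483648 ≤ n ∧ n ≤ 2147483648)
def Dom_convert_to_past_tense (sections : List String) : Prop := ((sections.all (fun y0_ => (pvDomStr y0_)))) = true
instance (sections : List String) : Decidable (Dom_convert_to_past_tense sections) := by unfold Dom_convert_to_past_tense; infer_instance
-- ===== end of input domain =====

-- B tokenizes each section ONCE on the "**" marker and maps each interior token through a
-- dict of past-tense phrases, instead of A's seven sequential full-string replace passes.

-- ===== PORT A =====
def convert_to_past_tense (sections : List String) : List String :=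
  sections.foldl
    (fun converted sec =>
      let s1 := PySem.Str.replace sec "**Searching Wikipedia...**" "**Searched Wikipedia**"
      let s2 := PySem.Str.replace s1 "**Searching...**" "**Searched**"
      let s3 := PySem.Str.replace s2 "**Reading Article...**" "**Read Article**"
      let s4 := PySem.Str.replace s3 "**Reading...**" "**Read Article**"
      let s5 := PySem.Str.replace s4 "**Searching Memory...**" "**Searched Memory**"
      let s6 := PySem.Str.replace s5 "**Thinking...**" "**Thought**"
      let s7 := PySem.Str.replace s6 "**Skipping Duplicate**" "**Skipped Duplicate**"
      converted ++ [s7])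
    []

-- ===== PORT B =====
-- Source B's _PAST dict (a literal dict with distinct keys, in insertion order)
def pvPast : PySem.Dict String String :=
  PySem.Dict.mk
    [("Searching Wikipedia...", "Searched Wikipedia"),
     ("Searching...", "Searched"),
     ("Reading Article...", "Read Article"),
     ("Reading...", "Read Article"),
     ("Searching Memory...", "Searched Memory"),
     ("Thinking...", "Thought"),
     ("Skipping Duplicate", "Skipped Duplicate")]

-- port of Source B: parts = section.split("**"); head, rest = parts[0], parts[1:];
-- if rest: rest = [_PAST.get(t, t) for t in rest[:-1]] + rest[-1:]; "**".join([head] + rest).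
-- (str.split never returns an empty list, so parts[0] is headD and parts[1:] is tail.)
def convert_to_past_tense_alt (sections : List String) : List String :=
  sections.foldl
    (fun converted sec =>
      let parts : List String := (PySem.Chars.splitOn sec.toList ['*', '*']).map String.ofList
      let head := parts.headD ""
      let rest := parts.tail
      let rest2 := if rest.isEmpty then rest
        else (PySem.List.slice rest none (some (-1))).map (fun t => PySem.Dict.getD pvPast t t)
             ++ PySem.List.slice rest (some (-1)) none
      converted ++ [PySem.Str.join "**" (head :: rest2)])
    []

-- ===== PRECONDITION & SPEC =====
-- the seven source phrases, without their "**" markers, as char lists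
def pvCores : List (List Char) :=
  ["Searching Wikipedia...".toList, "Searching...".toList, "Reading Article...".toList,
   "Reading...".toList, "Searching Memory...".toList, "Thinking...".toList,
   "Skipping Duplicate".toList]

-- no interior pair of adjacent tokens both equal to the core phrase c
def pvNoAdj (c : List Char) (toks : List (List Char)) : Prop :=
  ∀ i < toks.length, 1 ≤ i → i + 2 < toks.length → ¬(toks[i]? = some c ∧ toks[i+1]? = some c)

-- Pre_ excludes sections whose "**" markers are ambiguous: a stray '*' glued to the front of a
-- "**"-delimited token (an odd run of '*'s, where A's replace can still match across the run), or
-- the same phrase occurring twice sharing one "**" (A's non-overlapping replace keeps the second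
-- copy); on such corners A's greedy scan and B's tokenization are both defensible readings.
def Pre_convert_to_past_tense (sections : List String) : Prop :=
  ∀ s ∈ sections,
    (∀ t ∈ (PySem.Chars.splitOn s.toList ['*', '*']).drop 1, t.head? ≠ some '*') ∧
    (∀ c ∈ pvCores, pvNoAdj c (PySem.Chars.splitOn s.toList ['*', '*']))
instance (sections : List String) : Decidable (Pre_convert_to_past_tense sections) := by
  unfold Pre_convert_to_past_tense pvNoAdj; infer_instance

def pvWitness_convert_to_past_tense : List String :=
  ["**Searching Wikipedia...**\nresult found\n**Thinking...**", "plain text, no markers",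
   "**Searching...** and **Reading Article...**"]

def Spec_convert_to_past_tense (sections : List String) (out : List String) : Prop := out = convert_to_past_tense_alt sections
instance (sections : List String) (out : List String) : Decidable (Spec_convert_to_past_tense sections out) := by unfold Spec_convert_to_past_tense; infer_instance

-- ===== CLAIM (what is proved, stated in full; the proofs are below) =====
def Claim_equal_convert_to_past_tense : Prop := ∀ (sections : List String), Dom_convert_to_past_tense sections → Pre_convert_to_past_tense sections → Spec_convert_to_past_tense sections (convert_to_past_tense sections)

-- ===== LEMMAS AND PROOFS =====

-- the "**" delimiter
def pvD : List Char := ['*', '*']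

-- map every element except the last
def pvMapLast (f : List Char → List Char) : List (List Char) → List (List Char)
  | [] => []
  | [t] => [t]
  | t :: u :: rest => f t :: pvMapLast f (u :: rest)

-- map every element except the first and the last (Source B's interior tokens)
def pvMapMid (f : List Char → List Char) : List (List Char) → List (List Char)
  | t :: u :: rest => t :: pvMapLast f (u :: rest)
  | l => l

def pvSubst (core rcore t : List Char) : List Char := if t = core then rcore else t

-- token-list invariants the equivalence runs on
def pvGood (toks : List (List Char)) : Prop :=
  (∀ t ∈ toks, ¬ pvD <:+: t) ∧
  (∀ t ∈ toks.drop 1, t.head? ≠ some '*') ∧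
  (∀ t ∈ toks.dropLast, t.getLast? ≠ some '*')

theorem pvSplitGo_fuel (sep : List Char) (hsep : sep ≠ []) :
    ∀ (fuel fuel' : Nat) (l cur : List Char) (acc : List (List Char)),
      l.length ≤ fuel → l.length ≤ fuel' →
      PySem.Chars.splitOn.go sep fuel l cur acc = PySem.Chars.splitOn.go sep fuel' l cur acc := by
  intro fuel
  induction fuel with
  | zero =>
    intro fuel' l cur acc h h'
    have : l = [] := by cases l <;> simp_all
    subst this
    cases fuel' <;> simp [PySem.Chars.splitOn.go]
  | succ f ih =>
    intro fuel' l cur acc h h'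
    cases l with
    | nil => cases fuel' <;> simp [PySem.Chars.splitOn.go]
    | cons c rest =>
      cases fuel' with
      | zero => simp at h'
      | succ f' =>
        rw [PySem.Chars.splitOn.go, PySem.Chars.splitOn.go]
        have hs : 1 ≤ sep.length := by cases sep <;> simp_all
        by_cases hp : sep.isPrefixOf (c :: rest)
        · rw [if_pos hp, if_pos hp]
          apply ih <;> · simp [List.length_drop] at *; omega
        · rw [if_neg hp, if_neg hp]
          apply ih <;> · simp at *; omega

theorem pvGoAcc (sep : List Char) :
    ∀ (fuel : Nat) (l cur : List Char) (acc : List (List Char)),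
      PySem.Chars.splitOn.go sep fuel l cur acc = acc.reverse ++ PySem.Chars.splitOn.go sep fuel l cur [] := by
  intro fuel
  induction fuel with
  | zero => intro l cur acc; rw [PySem.Chars.splitOn.go, PySem.Chars.splitOn.go]; simp
  | succ f ih =>
    intro l cur acc
    cases l with
    | nil =>
      rw [PySem.Chars.splitOn.go, PySem.Chars.splitOn.go]
      · simp
      · omega
      · omega
    | cons c rest =>
      rw [PySem.Chars.splitOn.go, PySem.Chars.splitOn.go]
      by_cases hp : sep.isPrefixOf (c :: rest)
      · rw [if_pos hp, if_pos hp]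
        rw [ih _ _ (cur.reverse :: [])]
        rw [ih _ _ (cur.reverse :: acc)]
        simp
      · rw [if_neg hp, if_neg hp]
        exact ih rest (c :: cur) acc

theorem pvGoCur (sep : List Char) :
    ∀ (fuel : Nat) (l cur : List Char),
      ∃ h tl, PySem.Chars.splitOn.go sep fuel l [] [] = h :: tl ∧
        PySem.Chars.splitOn.go sep fuel l cur [] = (cur.reverse ++ h) :: tl := by
  intro fuel
  induction fuel with
  | zero =>
    intro l cur
    rw [PySem.Chars.splitOn.go, PySem.Chars.splitOn.go]
    exact ⟨l, [], by simp, by simp⟩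
  | succ f ih =>
    intro l cur
    cases l with
    | nil =>
      rw [PySem.Chars.splitOn.go, PySem.Chars.splitOn.go]
      · exact ⟨[], [], by simp, by simp⟩
      · omega
      · omega
    | cons c rest =>
      rw [PySem.Chars.splitOn.go, PySem.Chars.splitOn.go]
      by_cases hp : sep.isPrefixOf (c :: rest)
      · rw [if_pos hp, if_pos hp]
        refine ⟨[], PySem.Chars.splitOn.go sep f (List.drop sep.length (c :: rest)) [] [], ?_, ?_⟩
        · rw [pvGoAcc sep f _ [] [([] : List Char).reverse]]; simp
        · rw [pvGoAcc sep f _ [] [cur.reverse]]; simp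
      · rw [if_neg hp, if_neg hp]
        obtain ⟨h, tl, h1, h2⟩ := ih rest (c :: cur)
        obtain ⟨h', tl', h1', h2'⟩ := ih rest [c]
        -- go f rest [c] [] = (c :: h) :: tl from h2 specialized? we need relation between h and h'
        refine ⟨c :: h, tl, ?_, ?_⟩
        · -- go (c::rest) [] [] = go f rest [c] []
          have := ih rest [c]
          obtain ⟨h'', tl'', e1, e2⟩ := this
          -- e2 : go f rest [c] [] = ([c].reverse ++ h'') :: tl'' = (c :: h'') :: tl''
          -- and ih rest cur' ... need uniqueness: go f rest [] [] = h''::tl'' and also = h::tl from h1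
          rw [h1] at e1
          obtain ⟨rfl, rfl⟩ : h = h'' ∧ tl = tl'' := by
            have := e1
            simp only [List.cons.injEq] at this
            exact this
          simpa using e2
        · simpa using h2

theorem pvSplit_nil (sep : List Char) : PySem.Chars.splitOn [] sep = [[]] := by
  rw [PySem.Chars.splitOn, PySem.Chars.splitOn.go]
  · simp
  · omega

theorem pvSplit_cons (sep : List Char) (c : Char) (t : List Char)
    (h : sep.isPrefixOf (c :: t) = false) :
    ∃ h' tl, PySem.Chars.splitOn t sep = h' :: tl ∧
      PySem.Chars.splitOn (c :: t) sep = (c :: h') :: tl := by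
  rw [PySem.Chars.splitOn, PySem.Chars.splitOn]
  simp only [List.length_cons]
  rw [show t.length + 1 + 1 = (t.length + 1) + 1 from rfl]
  rw [PySem.Chars.splitOn.go]
  rw [if_neg (by simp [h])]
  obtain ⟨h', tl, h1, h2⟩ := pvGoCur sep (t.length + 1) t [c]
  exact ⟨h', tl, h1, by simpa using h2⟩

theorem pvSplit_prefix (sep m : List Char) (hsep : sep ≠ []) :
    PySem.Chars.splitOn (sep ++ m) sep = [] :: PySem.Chars.splitOn m sep := by
  rw [PySem.Chars.splitOn, PySem.Chars.splitOn]
  obtain ⟨c, sep', rfl⟩ : ∃ c sep', sep = c :: sep' := by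
    cases sep with | nil => simp at hsep | cons a b => exact ⟨a, b, rfl⟩
  have hlen : ((c :: sep') ++ m).length + 1 = (((c :: sep') ++ m).length) + 1 := rfl
  rw [show ((c :: sep') ++ m) = c :: (sep' ++ m) from rfl]
  rw [show (c :: (sep' ++ m)).length + 1 = ((c :: (sep' ++ m)).length) + 1 from rfl]
  rw [PySem.Chars.splitOn.go]
  rw [if_pos (by rw [List.isPrefixOf_iff_prefix]; exact ⟨m, by simp⟩)]
  simp only [List.reverse_nil]
  rw [pvGoAcc _ _ _ _ [[]]]
  have hdrop : List.drop (c :: sep').length (c :: (sep' ++ m)) = m := by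
    simp
  rw [hdrop]
  rw [pvSplitGo_fuel (c :: sep') (by simp) _ (m.length + 1) m [] [] (by simp; omega) (by omega)]
  simp

theorem pvRepGo_fuel (old new : List Char) (hold : old ≠ []) :
    ∀ (fuel fuel' : Nat) (l acc : List Char),
      l.length ≤ fuel → l.length ≤ fuel' →
      PySem.Chars.replace.go old new fuel l acc = PySem.Chars.replace.go old new fuel' l acc := by
  intro fuel
  induction fuel with
  | zero =>
    intro fuel' l acc h h'
    have : l = [] := by cases l <;> simp_all
    subst this
    cases fuel' <;> simp [PySem.Chars.replace.go]
  | succ f ih =>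
    intro fuel' l acc h h'
    cases l with
    | nil =>
      cases fuel' <;> simp [PySem.Chars.replace.go]
    | cons c rest =>
      cases fuel' with
      | zero => simp at h'
      | succ f' =>
        rw [PySem.Chars.replace.go, PySem.Chars.replace.go]
        have hs : 1 ≤ old.length := by cases old <;> simp_all
        by_cases hp : old.isPrefixOf (c :: rest)
        · rw [if_pos hp, if_pos hp]
          apply ih <;> · simp [List.length_drop] at *; omega
        · rw [if_neg hp, if_neg hp]
          apply ih <;> · simp at *; omega

theorem pvRepGoAcc (old new : List Char) :
    ∀ (fuel : Nat) (l acc : List Char),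
      PySem.Chars.replace.go old new fuel l acc = acc.reverse ++ PySem.Chars.replace.go old new fuel l [] := by
  intro fuel
  induction fuel with
  | zero => intro l acc; rw [PySem.Chars.replace.go, PySem.Chars.replace.go]; simp
  | succ f ih =>
    intro l acc
    cases l with
    | nil =>
      rw [PySem.Chars.replace.go, PySem.Chars.replace.go]
      · simp
      · omega
      · omega
    | cons c rest =>
      rw [PySem.Chars.replace.go, PySem.Chars.replace.go]
      by_cases hp : old.isPrefixOf (c :: rest)
      · rw [if_pos hp, if_pos hp]
        rw [ih _ (new.reverse ++ acc), ih _ (new.reverse ++ [])]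
        simp
      · rw [if_neg hp, if_neg hp]
        rw [ih _ (c :: acc), ih _ [c]]
        simp

theorem pvRep_nil (old new : List Char) (hold : old ≠ []) :
    PySem.Chars.replace [] old new = [] := by
  rw [PySem.Chars.replace]
  rw [if_neg (by simpa using hold)]
  simp [PySem.Chars.replace.go]

theorem pvRep_cons (old new : List Char) (hold : old ≠ []) (c : Char) (t : List Char)
    (h : old.isPrefixOf (c :: t) = false) :
    PySem.Chars.replace (c :: t) old new = c :: PySem.Chars.replace t old new := by
  rw [PySem.Chars.replace, PySem.Chars.replace]
  rw [if_neg (by simpa using hold), if_neg (by simpa using hold)]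
  simp only [List.length_cons]
  rw [PySem.Chars.replace.go]
  rw [if_neg (by simp [h])]
  rw [pvRepGoAcc]
  simp

theorem pvRep_prefix (old new m : List Char) (hold : old ≠ []) :
    PySem.Chars.replace (old ++ m) old new = new ++ PySem.Chars.replace m old new := by
  rw [PySem.Chars.replace, PySem.Chars.replace]
  rw [if_neg (by simpa using hold), if_neg (by simpa using hold)]
  obtain ⟨c, old', rfl⟩ : ∃ c old', old = c :: old' := by
    cases old with | nil => simp at hold | cons a b => exact ⟨a, b, rfl⟩
  rw [show ((c :: old') ++ m) = c :: (old' ++ m) from rfl]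
  simp only [List.length_cons]
  rw [PySem.Chars.replace.go]
  rw [if_pos (by rw [List.isPrefixOf_iff_prefix]; exact ⟨m, by simp⟩)]
  have hdrop : List.drop (c :: old').length (c :: (old' ++ m)) = m := by simp
  rw [hdrop]
  rw [pvRepGoAcc]
  rw [pvRepGo_fuel (c :: old') new (by simp) _ m.length m [] (by simp) (by omega)]
  simp

theorem pvTokAux : ∀ (n : Nat) (s : List Char), s.length ≤ n →
    ∃ h tl, PySem.Chars.splitOn s pvD = h :: tl ∧
      PySem.Chars.join pvD (h :: tl) = s ∧
      (∀ t ∈ PySem.Chars.splitOn s pvD, ¬ pvD <:+: t) ∧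
      (∀ c, h.head? = some c → s.head? = some c) ∧
      (∀ t ∈ (PySem.Chars.splitOn s pvD).dropLast, t.getLast? ≠ some '*') ∧
      (h = [] → s = [] ∨ pvD <+: s) := by
  intro n
  induction n with
  | zero =>
    intro s hs
    have : s = [] := by cases s <;> simp_all
    subst this
    refine ⟨[], [], pvSplit_nil pvD, by simp [PySem.Chars.join_singleton], ?_, ?_, ?_, ?_⟩
    · rw [pvSplit_nil]; intro t ht; simp at ht; subst ht; simp [pvD]
    · simp
    · rw [pvSplit_nil]; simp
    · intro _; left; rfl
  | succ n ih =>
    intro s hs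
    cases s with
    | nil => exact ih [] (by simp)
    | cons c t =>
      by_cases hp : pvD.isPrefixOf (c :: t)
      · -- s = pvD ++ m
        rw [List.isPrefixOf_iff_prefix] at hp
        obtain ⟨m, hm⟩ := hp
        rw [← hm]
        have hmlen : m.length ≤ n := by
          have := congrArg List.length hm
          simp [pvD] at this
          simp at hs
          omega
        obtain ⟨hm', tlm, e1, e2, e3, e4, e5, e6⟩ := ih m hmlen
        rw [pvSplit_prefix pvD m (by simp [pvD])]
        refine ⟨[], PySem.Chars.splitOn m pvD, rfl, ?_, ?_, by simp, ?_, ?_⟩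
        · rw [e1, PySem.Chars.join_cons_cons, e2]; simp
        · intro t' ht'
          simp only [List.mem_cons] at ht'
          rcases ht' with rfl | ht'
          · simp [pvD]
          · exact e3 t' ht'
        · intro t' ht'
          rw [e1] at ht'
          have ht2 : t' = [] ∨ t' ∈ (hm' :: tlm).dropLast := by
            cases tlm <;> simpa using ht'
          rcases ht2 with rfl | ht2
          · simp
          · exact e5 t' (by rw [e1]; exact ht2)
        · intro _; right; exact ⟨m, rfl⟩
      · -- head char is copied
        have hpf : pvD.isPrefixOf (c :: t) = false := by
          revert hp; cases hps : pvD.isPrefixOf (c :: t) <;> simp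
        obtain ⟨h', tl, e1, e2⟩ := pvSplit_cons pvD c t hpf
        obtain ⟨h'', tl', f1, f2, f3, f4, f5, f6⟩ := ih t (by simp at hs; omega)
        rw [f1] at e1
        have heq : h'' = h' ∧ tl' = tl := by
          have := e1; simp only [List.cons.injEq] at this; exact this
        obtain ⟨rfl, rfl⟩ := heq
        -- now h'' and tl' name the split of t, and splitOn (c::t) = (c::h'')::tl'
        rw [e2]
        have hjoin : PySem.Chars.join pvD ((c :: h'') :: tl') = c :: t := by
          cases tl' with
          | nil =>
            have h2 : h'' = t := by simpa [PySem.Chars.join_singleton] using f2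
            simp [PySem.Chars.join_singleton, h2]
          | cons a b =>
            rw [PySem.Chars.join_cons_cons]
            rw [PySem.Chars.join_cons_cons] at f2
            simpa using f2
        have hnp : ¬ pvD <+: (c :: t) := by
          rw [← List.isPrefixOf_iff_prefix, hpf]; simp
        have hheadfree : ¬ pvD <:+: (c :: h'') := by
          intro hinf
          rw [List.infix_cons_iff] at hinf
          rcases hinf with hpre | hinf
          · obtain ⟨z, hz⟩ := hpre
            have hc : c = '*' := by
              have := congrArg (fun l => l.head?) hz.symm
              simpa [pvD] using this
            have hh : h''.head? = some '*' := by
              have := congrArg (fun l => l.tail.head?) hz.symm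
              simpa [pvD] using this
            have ht := f4 '*' hh
            apply hnp
            cases t with
            | nil => simp at ht
            | cons d t' =>
              simp at ht
              exact ⟨t', by simp [pvD, hc, ht]⟩
          · exact f3 h'' (by rw [f1]; simp) hinf
        refine ⟨c :: h'', tl', rfl, hjoin, ?_, by simp, ?_, by simp⟩
        · intro t' ht'
          simp only [List.mem_cons] at ht'
          rcases ht' with rfl | ht'
          · exact hheadfree
          · exact f3 t' (by rw [f1]; simp [ht'])
        · cases tl' with
          | nil => simp
          | cons a b =>
            intro t' ht'
            have ht2 : t' = c :: h'' ∨ t' ∈ (a :: b).dropLast := by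
              simpa using ht'
            rcases ht2 with rfl | ht2
            · cases hh' : h'' with
              | nil =>
                subst hh'
                rcases f6 rfl with rfl | hdt
                · rw [pvSplit_nil] at f1
                  simp at f1
                · simp only [List.getLast?_singleton, ne_eq, Option.some.injEq]
                  intro hc
                  apply hnp
                  obtain ⟨z, hz⟩ := hdt
                  subst hc
                  exact ⟨'*' :: z, by rw [← hz]; simp [pvD]⟩
              | cons x xs =>
                rw [← hh']
                have hgl : (c :: h'').getLast? = h''.getLast? := by
                  rw [hh']; simp
                rw [hgl]
                exact f5 h'' (by rw [f1]; simp)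
            · exact f5 t' (by rw [f1]; simpa using Or.inr ht2)

theorem pvPatNe (core : List Char) : pvD ++ core ++ pvD ≠ [] := by simp [pvD]

theorem pvNotPrefixOf {l s : List Char} (h : ¬ l <+: s) : l.isPrefixOf s = false := by
  cases hb : l.isPrefixOf s
  · rfl
  · exact absurd (List.isPrefixOf_iff_prefix.mp hb) h

theorem pvNoOcc (core rcore s : List Char) (hs : ¬ pvD <:+: s) :
    PySem.Chars.replace s (pvD ++ core ++ pvD) (pvD ++ rcore ++ pvD) = s := by
  induction s with
  | nil => exact pvRep_nil _ _ (pvPatNe core)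
  | cons c t ih =>
    have hnp : ¬ (pvD ++ core ++ pvD) <+: (c :: t) := by
      intro hpre
      exact hs (List.IsPrefix.isInfix (by
        obtain ⟨z, hz⟩ := hpre
        exact ⟨core ++ pvD ++ z, by rw [← hz]; simp⟩))
    rw [pvRep_cons _ _ (pvPatNe core) _ _ (pvNotPrefixOf hnp)]
    rw [ih (fun hinf => hs (List.infix_cons hinf))]

theorem pvPeel (core rcore : List Char) :
    ∀ (t v : List Char), ¬ pvD <:+: t → t.getLast? ≠ some '*' →
    PySem.Chars.replace (t ++ (pvD ++ v)) (pvD ++ core ++ pvD) (pvD ++ rcore ++ pvD)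
      = t ++ PySem.Chars.replace (pvD ++ v) (pvD ++ core ++ pvD) (pvD ++ rcore ++ pvD) := by
  intro t
  induction t with
  | nil => intro v _ _; simp
  | cons c t' ih =>
    intro v hfree hlast
    have hnp : ¬ (pvD ++ core ++ pvD) <+: (c :: (t' ++ (pvD ++ v))) := by
      intro hpre
      obtain ⟨z, hz⟩ := hpre
      rw [show pvD ++ core ++ pvD = '*' :: '*' :: (core ++ pvD) from by simp [pvD]] at hz
      have hz1 : c = '*' := by
        have := congrArg List.head? hz
        simpa using this.symm
      have hz2 : t' ++ (pvD ++ v) = '*' :: ((core ++ pvD) ++ z) := by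
        have := congrArg List.tail hz
        simpa using this.symm
      cases t' with
      | nil =>
        rw [hz1] at hlast
        simp at hlast
      | cons d t'' =>
        apply hfree
        have hd : d = '*' := by
          have := congrArg List.head? hz2
          simpa using this
        refine List.IsPrefix.isInfix ⟨t'', ?_⟩
        rw [hz1, hd]
        simp [pvD]
    rw [List.cons_append, pvRep_cons _ _ (pvPatNe core) _ _ (pvNotPrefixOf hnp)]
    have hfree' : ¬ pvD <:+: t' := fun hinf => hfree (List.infix_cons hinf)
    have hlast' : t'.getLast? ≠ some '*' := by
      cases t' with
      | nil => simp
      | cons d t'' => simpa using hlast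
    rw [ih v hfree' hlast']
    simp

theorem pvPrefChar (core : List Char) (hcne : core ≠ []) (hstar : '*' ∉ core)
    (u : List Char) (rest : List (List Char))
    (hufree : ¬ pvD <:+: u) (hulast : rest ≠ [] → u.getLast? ≠ some '*')
    (hne : ¬ (u = core ∧ rest ≠ [])) :
    ¬ (core ++ pvD) <+: PySem.Chars.join pvD (u :: rest) := by
  intro hpre
  have hDinf : pvD <:+: (core ++ pvD) := (List.suffix_append core pvD).isInfix
  cases rest with
  | nil =>
    rw [PySem.Chars.join_singleton] at hpre
    exact hufree (hDinf.trans hpre.isInfix)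
  | cons r1 rs =>
    rw [PySem.Chars.join_cons_cons] at hpre
    have hul : u.getLast? ≠ some '*' := hulast (by simp)
    obtain ⟨z, hz⟩ := hpre
    rw [show u ++ pvD ++ PySem.Chars.join pvD (r1 :: rs) = u ++ (pvD ++ PySem.Chars.join pvD (r1 :: rs)) from by simp] at hz
    rcases lt_trichotomy u.length core.length with hlt | heq | hgt
    · have hdz := congrArg (List.drop u.length) hz
      rw [show core ++ pvD ++ z = core ++ (pvD ++ z) from by simp] at hdz
      rw [List.drop_append_of_le_length (le_of_lt hlt)] at hdz
      rw [List.drop_left] at hdz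
      obtain ⟨x, xs, hxx⟩ : ∃ x xs, core.drop u.length = x :: xs := by
        have hle : (core.drop u.length).length ≠ 0 := by simp; omega
        cases hc : core.drop u.length with
        | nil => rw [hc] at hle; simp at hle
        | cons a b => exact ⟨a, b, rfl⟩
      rw [hxx] at hdz
      have hx : x = '*' := by
        have := congrArg List.head? hdz
        simpa [pvD] using this
      apply hstar
      have hmem : x ∈ core.drop u.length := by rw [hxx]; simp
      rw [← hx]
      exact List.drop_subset _ _ hmem
    · have hdz := congrArg (List.take u.length) hz
      rw [show core ++ pvD ++ z = core ++ (pvD ++ z) from by simp] at hdz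
      rw [List.take_append_of_le_length (by omega)] at hdz
      rw [List.take_left' rfl] at hdz
      rw [heq, List.take_length] at hdz
      exact hne ⟨hdz.symm, by simp⟩
    · rcases Nat.lt_or_ge u.length (core.length + 2) with hlt2 | hge2
      · have heq1 : u.length = core.length + 1 := by omega
        have hdz := congrArg (List.drop core.length) hz
        rw [show core ++ pvD ++ z = core ++ (pvD ++ z) from by simp] at hdz
        rw [List.drop_left] at hdz
        rw [List.drop_append_of_le_length (by omega)] at hdz
        obtain ⟨y, hy⟩ : ∃ y, u.drop core.length = [y] := by
          have hl1 : (u.drop core.length).length = 1 := by simp; omega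
          cases hu : u.drop core.length with
          | nil => rw [hu] at hl1; simp at hl1
          | cons a b =>
            rw [hu] at hl1; simp at hl1
            exact ⟨a, by rw [hl1]⟩
        rw [hy] at hdz
        have hy' : y = '*' := by
          have := congrArg List.head? hdz
          simpa [pvD] using this.symm
        apply hul
        have hgl : u.getLast? = some y := by
          have htad := List.take_append_drop core.length u
          rw [hy] at htad
          rw [← htad]
          simp
        rw [hgl, hy']
      · apply hufree
        have hdz := congrArg (List.take (core.length + 2)) hz
        rw [List.take_left' (by simp [pvD])] at hdz
        rw [List.take_append_of_le_length (by omega)] at hdz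
        have hpref : (core ++ pvD) <+: u := hdz ▸ List.take_prefix _ _
        exact hDinf.trans hpref.isInfix

theorem pvMapLast_ne_nil (f : List Char → List Char) (l : List (List Char)) (h : l ≠ []) :
    pvMapLast f l ≠ [] := by
  cases l with
  | nil => simp at h
  | cons a b => cases b <;> simp [pvMapLast]

theorem pvMLEQ (core rcore : List Char) (m : List (List Char))
    (hhd : ∀ r, m = core :: r → r = []) :
    pvMapLast (pvSubst core rcore) m = pvMapMid (pvSubst core rcore) m := by
  cases m with
  | nil => rfl
  | cons x r =>
    cases r with
    | nil => rfl
    | cons y r' =>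
      have hx : x ≠ core := fun hxc => by simpa using hhd (y :: r') (by rw [hxc])
      simp [pvMapLast, pvMapMid, pvSubst, hx]

theorem pvGood_tail (t : List Char) (rest : List (List Char)) (hne : rest ≠ [])
    (hg : pvGood (t :: rest)) : pvGood rest := by
  obtain ⟨g1, g2, g3⟩ := hg
  refine ⟨fun x hx => g1 x (by simp [hx]), fun x hx => g2 x (by
    simpa using List.drop_subset _ _ hx), fun x hx => g3 x ?_⟩
  rw [List.dropLast_cons_of_ne_nil hne]
  simp [hx]

theorem pvNoAdj_tail (c t : List Char) (rest : List (List Char))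
    (h : pvNoAdj c (t :: rest)) : pvNoAdj c rest := by
  intro i hi h1 h2
  have := h (i + 1) (by simp; omega) (by omega) (by simp; omega)
  simpa using this

theorem pvHeart (core rcore : List Char) (hc : core ≠ []) (h1 : '*' ∉ core) (h2 : '*' ∉ rcore) :
    ∀ n toks, toks.length ≤ n → toks ≠ [] → pvGood toks → pvNoAdj core toks →
      PySem.Chars.replace (PySem.Chars.join pvD toks) (pvD ++ core ++ pvD) (pvD ++ rcore ++ pvD)
        = PySem.Chars.join pvD (pvMapMid (pvSubst core rcore) toks) := by
  intro n
  induction n with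
  | zero => intro toks hl hne; cases toks <;> simp_all
  | succ n ih =>
    intro toks hl hne hg hadj
    cases toks with
    | nil => simp at hne
    | cons t rest0 =>
     cases rest0 with
     | nil =>
      rw [PySem.Chars.join_singleton]
      rw [pvNoOcc core rcore t (hg.1 t (by simp))]
      simp [pvMapMid, PySem.Chars.join_singleton]
     | cons u rest =>
      have hfree_t : ¬ pvD <:+: t := hg.1 t (by simp)
      have hlast_t : t.getLast? ≠ some '*' := hg.2.2 t (by simp)
      rw [PySem.Chars.join_cons_cons]
      rw [show t ++ pvD ++ PySem.Chars.join pvD (u :: rest) = t ++ (pvD ++ PySem.Chars.join pvD (u :: rest)) from by simp]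
      rw [pvPeel core rcore t _ hfree_t hlast_t]
      have hgood_ur : pvGood (u :: rest) := pvGood_tail t (u :: rest) (by simp) hg
      have hadj_ur : pvNoAdj core (u :: rest) := pvNoAdj_tail core t (u :: rest) hadj
      have huhead : u.head? ≠ some '*' := hg.2.1 u (by simp)
      by_cases hm : u = core ∧ rest ≠ []
      · obtain ⟨hue, hrne⟩ := hm
        rw [hue] at hgood_ur hadj_ur hadj ⊢
        obtain ⟨r1, rs, rfl⟩ : ∃ r1 rs, rest = r1 :: rs := by
          cases rest with | nil => simp at hrne | cons a b => exact ⟨a, b, rfl⟩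
        have hsplit : pvD ++ PySem.Chars.join pvD (core :: r1 :: rs)
            = (pvD ++ core ++ pvD) ++ PySem.Chars.join pvD (r1 :: rs) := by
          rw [PySem.Chars.join_cons_cons]; simp
        rw [hsplit, pvRep_prefix _ _ _ (pvPatNe core)]
        rw [ih (r1 :: rs) (by simp at hl ⊢; omega) (by simp)
            (pvGood_tail core (r1 :: rs) (by simp) hgood_ur)
            (pvNoAdj_tail core core (r1 :: rs) hadj_ur)]
        have hr1 : ∀ r, r1 :: rs = core :: r → r = [] := by
          intro r hr
          by_contra hrne2
          obtain ⟨hr1c, hrs⟩ : r1 = core ∧ rs = r := by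
            have := hr; simp only [List.cons.injEq] at this; exact this
          refine hadj 1 (by simp) (by omega) ?_ ⟨by simp, by simp [hr1c]⟩
          rw [hrs]
          cases r with
          | nil => exact absurd rfl hrne2
          | cons a b => simp
        have hml := pvMLEQ core rcore (r1 :: rs) hr1
        have hmid : pvMapMid (pvSubst core rcore) (t :: core :: r1 :: rs)
            = t :: rcore :: pvMapLast (pvSubst core rcore) (r1 :: rs) := by
          show t :: pvMapLast (pvSubst core rcore) (core :: r1 :: rs) = _
          rw [show pvMapLast (pvSubst core rcore) (core :: r1 :: rs)
              = pvSubst core rcore core :: pvMapLast (pvSubst core rcore) (r1 :: rs) from rfl]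
          rw [show pvSubst core rcore core = rcore from by simp [pvSubst]]
        rw [hmid, hml]
        obtain ⟨m1, ms, hms⟩ : ∃ m1 ms, pvMapMid (pvSubst core rcore) (r1 :: rs) = m1 :: ms := by
          cases hmm : pvMapMid (pvSubst core rcore) (r1 :: rs) with
          | nil => cases rs <;> simp [pvMapMid, pvMapLast] at hmm
          | cons a b => exact ⟨a, b, rfl⟩
        rw [hms]
        rw [PySem.Chars.join_cons_cons]
        rw [PySem.Chars.join_cons_cons]
        simp
      · have hne2 : ¬ (u = core ∧ rest ≠ []) := hm
        have hnpre : ¬ (core ++ pvD) <+: PySem.Chars.join pvD (u :: rest) :=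
          pvPrefChar core hc h1 u rest (hg.1 u (by simp))
            (fun hr => hg.2.2 u (by
              rw [List.dropLast_cons_of_ne_nil (by simp)]
              rw [List.dropLast_cons_of_ne_nil hr]
              simp)) hne2
        have hs1 : ¬ (pvD ++ core ++ pvD) <+: ('*' :: '*' :: PySem.Chars.join pvD (u :: rest)) := by
          intro hp
          apply hnpre
          rw [show pvD ++ core ++ pvD = '*' :: '*' :: (core ++ pvD) from by simp [pvD]] at hp
          obtain ⟨z, hz⟩ := hp
          exact ⟨z, by simpa using hz⟩
        have hs2 : ¬ (pvD ++ core ++ pvD) <+: ('*' :: PySem.Chars.join pvD (u :: rest)) := by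
          intro hp
          rw [show pvD ++ core ++ pvD = '*' :: '*' :: (core ++ pvD) from by simp [pvD]] at hp
          obtain ⟨z, hz⟩ := hp
          have hz2 : PySem.Chars.join pvD (u :: rest) = '*' :: ((core ++ pvD) ++ z) := by
            have := congrArg List.tail hz
            simpa using this.symm
          cases hu : u with
          | cons a b =>
            apply huhead
            rw [hu]
            have hhd := congrArg List.head? hz2
            cases rest with
            | nil =>
              rw [PySem.Chars.join_singleton, hu] at hhd
              simpa using hhd
            | cons r1 rs =>
              rw [PySem.Chars.join_cons_cons, hu] at hhd
              simpa using hhd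
          | nil =>
            subst hu
            cases rest with
            | nil =>
              rw [PySem.Chars.join_singleton] at hz2
              simp at hz2
            | cons r1 rs =>
              rw [PySem.Chars.join_cons_cons] at hz2
              have htl := congrArg List.tail hz2
              simp [pvD] at htl
              obtain ⟨c0, ctl, rfl⟩ : ∃ c0 ctl, core = c0 :: ctl := by
                cases core with | nil => simp at hc | cons a b => exact ⟨a, b, rfl⟩
              have hhd := congrArg List.head? htl
              simp at hhd
              exact h1 (by rw [hhd]; simp)
        rw [show pvD ++ PySem.Chars.join pvD (u :: rest)
            = '*' :: '*' :: PySem.Chars.join pvD (u :: rest) from by simp [pvD]]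
        rw [pvRep_cons _ _ (pvPatNe core) _ _ (pvNotPrefixOf hs1)]
        rw [pvRep_cons _ _ (pvPatNe core) _ _ (pvNotPrefixOf hs2)]
        rw [ih (u :: rest) (by simp at hl ⊢; omega) (by simp) hgood_ur hadj_ur]
        have hhd2 : ∀ r, u :: rest = core :: r → r = [] := by
          intro r hr
          obtain ⟨huc, hrr⟩ : u = core ∧ rest = r := by
            have := hr; simp only [List.cons.injEq] at this; exact this
          by_contra hrne2
          exact hne2 ⟨huc, by rw [hrr]; exact hrne2⟩
        have hml := pvMLEQ core rcore (u :: rest) hhd2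
        have hmne : pvMapMid (pvSubst core rcore) (u :: rest) ≠ [] := by
          cases rest <;> simp [pvMapMid, pvMapLast]
        obtain ⟨m1, ms, hms⟩ : ∃ m1 ms, pvMapMid (pvSubst core rcore) (u :: rest) = m1 :: ms := by
          cases hmm : pvMapMid (pvSubst core rcore) (u :: rest) with
          | nil => exact absurd hmm hmne
          | cons a b => exact ⟨a, b, rfl⟩
        rw [show pvMapMid (pvSubst core rcore) (t :: u :: rest)
            = t :: pvMapLast (pvSubst core rcore) (u :: rest) from rfl]
        rw [hml, hms]
        rw [PySem.Chars.join_cons_cons]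
        simp [pvD]

theorem pvMapLast_id (f : List Char → List Char) (hf : ∀ x, f x = x) :
    ∀ m : List (List Char), pvMapLast f m = m := by
  intro m
  induction m with
  | nil => rfl
  | cons t r ih =>
    cases r with
    | nil => rfl
    | cons u r' => rw [show pvMapLast f (t :: u :: r') = f t :: pvMapLast f (u :: r') from rfl, hf, ih]

theorem pvMapMid_id (f : List Char → List Char) (hf : ∀ x, f x = x) (l : List (List Char)) :
    pvMapMid f l = l := by
  cases l with
  | nil => rfl
  | cons t m =>
    cases m with
    | nil => rfl
    | cons u r => rw [show pvMapMid f (t :: u :: r) = t :: pvMapLast f (u :: r) from rfl,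
        pvMapLast_id f hf]

theorem pvMapLast_comp (f g : List Char → List Char) :
    ∀ m : List (List Char), pvMapLast g (pvMapLast f m) = pvMapLast (fun t => g (f t)) m := by
  intro m
  induction m with
  | nil => rfl
  | cons t r ih =>
    cases r with
    | nil => rfl
    | cons u r' =>
      obtain ⟨x, xs, hx⟩ : ∃ x xs, pvMapLast f (u :: r') = x :: xs := by
        cases r' <;> exact ⟨_, _, rfl⟩
      rw [show pvMapLast f (t :: u :: r') = f t :: pvMapLast f (u :: r') from rfl, hx]
      rw [show pvMapLast g (f t :: x :: xs) = g (f t) :: pvMapLast g (x :: xs) from rfl]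
      rw [← hx, ih]
      rfl

theorem pvMapMid_comp (f g : List Char → List Char) (l : List (List Char)) :
    pvMapMid g (pvMapMid f l) = pvMapMid (fun t => g (f t)) l := by
  cases l with
  | nil => rfl
  | cons t m =>
    cases m with
    | nil => rfl
    | cons u r =>
      obtain ⟨x, xs, hx⟩ : ∃ x xs, pvMapLast f (u :: r) = x :: xs := by
        cases r <;> exact ⟨_, _, rfl⟩
      rw [show pvMapMid f (t :: u :: r) = t :: pvMapLast f (u :: r) from rfl, hx]
      rw [show pvMapMid g (t :: x :: xs) = t :: pvMapLast g (x :: xs) from rfl]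
      rw [← hx, pvMapLast_comp]
      rfl

theorem pvMapLast_eq (f : List Char → List Char) :
    ∀ m : List (List Char), m ≠ [] →
      pvMapLast f m = m.dropLast.map f ++ m.drop (m.length - 1) := by
  intro m
  induction m with
  | nil => intro h; simp at h
  | cons t r ih =>
    intro _
    cases r with
    | nil => rfl
    | cons u r' =>
      rw [show pvMapLast f (t :: u :: r') = f t :: pvMapLast f (u :: r') from rfl]
      rw [ih (by simp)]
      simp

theorem pvMapLast_mem (f : List Char → List Char) :
    ∀ m x, x ∈ pvMapLast f m → x ∈ m ∨ ∃ y ∈ m, x = f y := by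
  intro m
  induction m with
  | nil => intro x hx; simp [pvMapLast] at hx
  | cons t r ih =>
    intro x hx
    cases r with
    | nil => left; simpa [pvMapLast] using hx
    | cons u r' =>
      rw [show pvMapLast f (t :: u :: r') = f t :: pvMapLast f (u :: r') from rfl] at hx
      rcases List.mem_cons.mp hx with rfl | hx'
      · right; exact ⟨t, by simp, rfl⟩
      · rcases ih x hx' with h | ⟨y, hy, rfl⟩
        · left; simp [h]
        · right; exact ⟨y, by simp [hy], rfl⟩

theorem pvMapLast_getElem? (f : List Char → List Char) :
    ∀ (m : List (List Char)) (i : Nat) (x : List Char), (pvMapLast f m)[i]? = some x → m[i]? = some x ∨ ∃ y, m[i]? = some y ∧ x = f y := by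
  intro m
  induction m with
  | nil => intro i x hx; simp [pvMapLast] at hx
  | cons t r ih =>
    intro i x hx
    cases r with
    | nil => left; simpa [pvMapLast] using hx
    | cons u r' =>
      rw [show pvMapLast f (t :: u :: r') = f t :: pvMapLast f (u :: r') from rfl] at hx
      cases i with
      | zero => right; exact ⟨t, by simp, by simpa using hx.symm⟩
      | succ j =>
        simp only [List.getElem?_cons_succ] at hx ⊢
        exact ih j x hx

theorem pvMapMid_length (f : List Char → List Char) (l : List (List Char)) :
    (pvMapMid f l).length = l.length := by
  cases l with
  | nil => rfl
  | cons t m =>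
    cases m with
    | nil => rfl
    | cons u r =>
      rw [show pvMapMid f (t :: u :: r) = t :: pvMapLast f (u :: r) from rfl]
      have : ∀ m' : List (List Char), (pvMapLast f m').length = m'.length := by
        intro m'
        induction m' with
        | nil => rfl
        | cons a b ihb =>
          cases b with
          | nil => rfl
          | cons c d => rw [show pvMapLast f (a :: c :: d) = f a :: pvMapLast f (c :: d) from rfl]; simpa using ihb
      simp [this]

theorem pvMapMid_ne_nil (f : List Char → List Char) (l : List (List Char)) (h : l ≠ []) :
    pvMapMid f l ≠ [] := by
  intro hc
  have := pvMapMid_length f l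
  rw [hc] at this
  cases l <;> simp_all

theorem pvRcoreFree (rcore : List Char) (h2 : '*' ∉ rcore) : ¬ pvD <:+: rcore :=
  fun hinf => h2 (hinf.subset (by simp [pvD]))

theorem pvGoodPres (core rcore : List Char) (h2 : '*' ∉ rcore) (l : List (List Char))
    (hg : pvGood l) : pvGood (pvMapMid (pvSubst core rcore) l) := by
  cases l with
  | nil => exact hg
  | cons t m =>
    cases m with
    | nil => exact hg
    | cons u r =>
      obtain ⟨g1, g2, g3⟩ := hg
      have hsub : ∀ y, pvSubst core rcore y = y ∨ pvSubst core rcore y = rcore := by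
        intro y; by_cases hy : y = core <;> simp [pvSubst, hy]
      rw [show pvMapMid (pvSubst core rcore) (t :: u :: r) = t :: pvMapLast (pvSubst core rcore) (u :: r) from rfl]
      refine ⟨?_, ?_, ?_⟩
      · intro x hx
        rcases List.mem_cons.mp hx with rfl | hx'
        · exact g1 x (by simp)
        · rcases pvMapLast_mem _ _ x hx' with h | ⟨y, hy, rfl⟩
          · exact g1 x (by simp [h])
          · rcases hsub y with he | he
            · rw [he]; exact g1 y (by simp [hy])
            · rw [he]; exact pvRcoreFree rcore h2
      · intro x hx
        simp only [List.drop_succ_cons, List.drop_zero] at hx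
        rcases pvMapLast_mem _ _ x hx with h | ⟨y, hy, rfl⟩
        · exact g2 x (by simpa using h)
        · rcases hsub y with he | he
          · rw [he]; exact g2 y (by simpa using hy)
          · rw [he]
            intro hh
            apply h2
            cases rcore with
            | nil => simp at hh
            | cons a b => simp at hh; simp [hh]
      · intro x hx
        rw [List.dropLast_cons_of_ne_nil (pvMapLast_ne_nil _ _ (by simp))] at hx
        rcases List.mem_cons.mp hx with rfl | hx'
        · exact g3 x (by rw [List.dropLast_cons_of_ne_nil (by simp)]; simp)
        · rw [pvMapLast_eq _ _ (by simp)] at hx'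
          obtain ⟨a, ha⟩ : ∃ a, (u :: r).drop ((u :: r).length - 1) = [a] := by
            have hlen : ((u :: r).drop ((u :: r).length - 1)).length = 1 := by simp
            cases hd : (u :: r).drop ((u :: r).length - 1) with
            | nil => rw [hd] at hlen; simp at hlen
            | cons p q =>
              refine ⟨p, ?_⟩
              rw [hd] at hlen
              simp at hlen
              rw [hlen]
          rw [ha, List.dropLast_concat] at hx'
          obtain ⟨y, hy, rfl⟩ := List.mem_map.mp hx'
          have hymem : y ∈ (t :: u :: r).dropLast := by
            rw [List.dropLast_cons_of_ne_nil (by simp)]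
            simp [hy]
          rcases hsub y with he | he
          · rw [he]; exact g3 y hymem
          · rw [he]
            intro hh
            apply h2
            have := List.mem_of_getLast? hh
            exact this

theorem pvNoAdjPres (core rcore c : List Char) (hrc : rcore ≠ c) (l : List (List Char))
    (ha : pvNoAdj c l) : pvNoAdj c (pvMapMid (pvSubst core rcore) l) := by
  have hpull : ∀ (i : Nat), (pvMapMid (pvSubst core rcore) l)[i]? = some c → l[i]? = some c := by
    intro i hx
    cases l with
    | nil => simpa [pvMapMid] using hx
    | cons t m =>
      cases m with
      | nil => simpa [pvMapMid] using hx
      | cons u r =>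
        rw [show pvMapMid (pvSubst core rcore) (t :: u :: r) = t :: pvMapLast (pvSubst core rcore) (u :: r) from rfl] at hx
        cases i with
        | zero => simp at hx ⊢; exact hx
        | succ j =>
          simp only [List.getElem?_cons_succ] at hx ⊢
          rcases pvMapLast_getElem? _ _ j c hx with h | ⟨y, hy, he⟩
          · exact h
          · rcases (by by_cases hyc : y = core <;> simp [pvSubst, hyc] :
                pvSubst core rcore y = y ∨ pvSubst core rcore y = rcore) with h' | h'
            · rw [h'] at he; rw [hy, ← he]
            · rw [h'] at he; exact absurd he.symm hrc
  intro i hi h1 h2 hpair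
  rw [pvMapMid_length] at hi h2
  exact ha i hi h1 h2 ⟨hpull i hpair.1, hpull (i+1) hpair.2⟩

def pvChain (rs : List (List Char × List Char)) (t : List Char) : List Char :=
  rs.foldl (fun t p => pvSubst p.1 p.2 t) t

-- the seven (core, past-tense core) rules, in A's pass order
def pvRules : List (List Char × List Char) :=
  [("Searching Wikipedia...".toList, "Searched Wikipedia".toList),
   ("Searching...".toList, "Searched".toList),
   ("Reading Article...".toList, "Read Article".toList),
   ("Reading...".toList, "Read Article".toList),
   ("Searching Memory...".toList, "Searched Memory".toList),
   ("Thinking...".toList, "Thought".toList),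
   ("Skipping Duplicate".toList, "Skipped Duplicate".toList)]

theorem pvCompose (rs : List (List Char × List Char))
    (hrs : ∀ p ∈ rs, p.1 ≠ [] ∧ '*' ∉ p.1 ∧ '*' ∉ p.2 ∧ ∀ c ∈ pvCores, p.2 ≠ c)
    (hrc : ∀ p ∈ rs, p.1 ∈ pvCores) :
    ∀ toks, toks ≠ [] → pvGood toks → (∀ c ∈ pvCores, pvNoAdj c toks) →
      rs.foldl (fun s p => PySem.Chars.replace s (pvD ++ p.1 ++ pvD) (pvD ++ p.2 ++ pvD))
          (PySem.Chars.join pvD toks)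
        = PySem.Chars.join pvD (pvMapMid (pvChain rs) toks) := by
  induction rs with
  | nil =>
    intro toks _ _ _
    rw [List.foldl_nil, pvMapMid_id (pvChain []) (fun x => rfl)]
  | cons p rs' ih =>
    intro toks hne hg hadj
    obtain ⟨hp1, hp2, hp3, hp4⟩ := hrs p (by simp)
    rw [List.foldl_cons]
    rw [pvHeart p.1 p.2 hp1 hp2 hp3 toks.length toks (le_refl _) hne hg
        (hadj p.1 (hrc p (by simp)))]
    rw [ih (fun q hq => hrs q (by simp [hq])) (fun q hq => hrc q (by simp [hq]))
        (pvMapMid (pvSubst p.1 p.2) toks)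
        (pvMapMid_ne_nil _ _ hne)
        (pvGoodPres p.1 p.2 hp3 toks hg)
        (fun c hc => pvNoAdjPres p.1 p.2 c (hp4 c hc) toks (hadj c hc))]
    rw [pvMapMid_comp]
    rfl

theorem pvKeyNe (t : List Char) (s : String) (h : t ≠ s.toList) : (s == String.ofList t) = false := by
  rw [beq_eq_false_iff_ne]
  intro he
  exact h (by rw [he]; simp)

theorem pvLookup (t : List Char) :
    (PySem.Dict.getD pvPast (String.ofList t) (String.ofList t)).toList = pvChain pvRules t := by
  by_cases h1 : t = "Searching Wikipedia...".toList
  · subst h1; decide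
  by_cases h2 : t = "Searching...".toList
  · subst h2; decide
  by_cases h3 : t = "Reading Article...".toList
  · subst h3; decide
  by_cases h4 : t = "Reading...".toList
  · subst h4; decide
  by_cases h5 : t = "Searching Memory...".toList
  · subst h5; decide
  by_cases h6 : t = "Thinking...".toList
  · subst h6; decide
  by_cases h7 : t = "Skipping Duplicate".toList
  · subst h7; decide
  have hL : PySem.Dict.getD pvPast (String.ofList t) (String.ofList t) = String.ofList t := by
    simp [pvPast, PySem.Dict.getD, PySem.Dict.get?_mk_cons,
      pvKeyNe t _ h1, pvKeyNe t _ h2, pvKeyNe t _ h3, pvKeyNe t _ h4,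
      pvKeyNe t _ h5, pvKeyNe t _ h6, pvKeyNe t _ h7]
    simp [PySem.Dict.get?]
  rw [hL]
  simp only [String.toList_ofList]
  simp only [pvChain, pvRules, List.foldl_cons, List.foldl_nil, pvSubst]
  rw [if_neg h1, if_neg h2, if_neg h3, if_neg h4, if_neg h5, if_neg h6, if_neg h7]

-- ---- per-section equality, then lift over the list of sections ----

set_option maxHeartbeats 1000000 in
theorem pvSection (sec : String)
    (hhead : ∀ t ∈ (PySem.Chars.splitOn sec.toList pvD).drop 1, t.head? ≠ some '*')
    (hadj : ∀ c ∈ pvCores, pvNoAdj c (PySem.Chars.splitOn sec.toList pvD)) :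
    (PySem.Str.replace (PySem.Str.replace (PySem.Str.replace (PySem.Str.replace (PySem.Str.replace (PySem.Str.replace (PySem.Str.replace sec
        "**Searching Wikipedia...**" "**Searched Wikipedia**")
        "**Searching...**" "**Searched**")
        "**Reading Article...**" "**Read Article**")
        "**Reading...**" "**Read Article**")
        "**Searching Memory...**" "**Searched Memory**")
        "**Thinking...**" "**Thought**")
        "**Skipping Duplicate**" "**Skipped Duplicate**")
      = (let parts : List String := (PySem.Chars.splitOn sec.toList ['*', '*']).map String.ofList
         let head := parts.headD ""
         let rest := parts.tail
         let rest2 := if rest.isEmpty then rest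
           else (PySem.List.slice rest none (some (-1))).map (fun t => PySem.Dict.getD pvPast t t)
                ++ PySem.List.slice rest (some (-1)) none
         PySem.Str.join "**" (head :: rest2)) := by
  obtain ⟨h, tl, e1, e2, e3, e4, e5, e6⟩ := pvTokAux sec.toList.length sec.toList (le_refl _)
  have hgood : pvGood (h :: tl) := by
    refine ⟨by rw [← e1]; exact e3, ?_, by rw [← e1]; exact e5⟩
    intro x hx
    apply hhead x
    rw [e1]
    exact hx
  have hadj' : ∀ c ∈ pvCores, pvNoAdj c (h :: tl) := by
    intro c hc
    have := hadj c hc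
    rw [e1] at this
    exact this
  have hcomp := pvCompose pvRules (by decide) (by decide) (h :: tl) (by simp) hgood hadj'
  rw [e2] at hcomp
  simp only [pvRules, List.foldl_cons, List.foldl_nil] at hcomp
  apply String.toList_inj.mp
  -- A side
  have hA : (PySem.Str.replace (PySem.Str.replace (PySem.Str.replace (PySem.Str.replace (PySem.Str.replace (PySem.Str.replace (PySem.Str.replace sec
        "**Searching Wikipedia...**" "**Searched Wikipedia**")
        "**Searching...**" "**Searched**")
        "**Reading Article...**" "**Read Article**")
        "**Reading...**" "**Read Article**")
        "**Searching Memory...**" "**Searched Memory**")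
        "**Thinking...**" "**Thought**")
        "**Skipping Duplicate**" "**Skipped Duplicate**").toList
      = PySem.Chars.join pvD (pvMapMid (pvChain pvRules) (h :: tl)) := by
    simp only [PySem.Str.toList_replace]
    rw [show "**Searching Wikipedia...**".toList = pvD ++ "Searching Wikipedia...".toList ++ pvD from by decide,
        show "**Searched Wikipedia**".toList = pvD ++ "Searched Wikipedia".toList ++ pvD from by decide,
        show "**Searching...**".toList = pvD ++ "Searching...".toList ++ pvD from by decide,
        show "**Searched**".toList = pvD ++ "Searched".toList ++ pvD from by decide,
        show "**Reading Article...**".toList = pvD ++ "Reading Article...".toList ++ pvD from by decide,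
        show "**Read Article**".toList = pvD ++ "Read Article".toList ++ pvD from by decide,
        show "**Reading...**".toList = pvD ++ "Reading...".toList ++ pvD from by decide,
        show "**Searching Memory...**".toList = pvD ++ "Searching Memory...".toList ++ pvD from by decide,
        show "**Searched Memory**".toList = pvD ++ "Searched Memory".toList ++ pvD from by decide,
        show "**Thinking...**".toList = pvD ++ "Thinking...".toList ++ pvD from by decide,
        show "**Thought**".toList = pvD ++ "Thought".toList ++ pvD from by decide,
        show "**Skipping Duplicate**".toList = pvD ++ "Skipping Duplicate".toList ++ pvD from by decide,
        show "**Skipped Duplicate**".toList = pvD ++ "Skipped Duplicate".toList ++ pvD from by decide]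
    exact hcomp
  rw [hA]
  -- B side
  have e1' : PySem.Chars.splitOn sec.toList ['*', '*'] = h :: tl := e1
  show PySem.Chars.join pvD (pvMapMid (pvChain pvRules) (h :: tl)) = _
  rw [PySem.Str.toList_join]
  simp only [e1']
  cases tl with
  | nil =>
    simp only [List.map_cons, List.map_nil, List.headD_cons, List.tail_cons, List.isEmpty_nil,
      if_pos rfl]
    simp [pvMapMid, PySem.Chars.join_singleton, String.toList_ofList]
  | cons u tl' =>
    simp only [List.map_cons, List.headD_cons, List.tail_cons]
    rw [if_neg (by simp)]
    rw [PySem.List.slice_to_neg_one, PySem.List.slice_from_neg_one]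
    have hmm : pvMapMid (pvChain pvRules) (h :: u :: tl')
        = h :: ((u :: tl').dropLast.map (pvChain pvRules) ++ (u :: tl').drop ((u :: tl').length - 1)) := by
      rw [show pvMapMid (pvChain pvRules) (h :: u :: tl') = h :: pvMapLast (pvChain pvRules) (u :: tl') from rfl]
      rw [pvMapLast_eq _ _ (by simp)]
    rw [hmm]
    have hsep : ("**" : String).toList = pvD := by decide
    rw [hsep]
    apply congrArg (PySem.Chars.join pvD)
    simp only [List.map_cons, List.map_append, List.map_map, String.toList_ofList]
    refine congrArg₂ List.cons rfl ?_
    refine congrArg₂ (· ++ ·) ?_ ?_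
    · rw [show (String.ofList u :: List.map String.ofList tl').dropLast
          = ((u :: tl').dropLast.map String.ofList) from by rw [← List.map_cons]; exact Eq.symm List.map_dropLast]
      simp only [List.map_map]
      apply List.map_congr_left
      intro x _
      exact (pvLookup x).symm
    · rw [show (String.ofList u :: List.map String.ofList tl') = (u :: tl').map String.ofList from by simp]
      rw [List.length_map, ← List.map_drop, List.map_map]
      conv_lhs => rw [← List.map_id ((u :: tl').drop ((u :: tl').length - 1))]
      apply List.map_congr_left
      intro x _
      simp


theorem pvFoldAppend {α β : Type} (f : α → β) (l : List α) :
    ∀ (init : List β), l.foldl (fun acc x => acc ++ [f x]) init = init ++ l.map f := by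
  induction l with
  | nil => intro init; simp
  | cons x xs ih => intro init; simp [List.foldl_cons, ih]

-- ===== VERDICT (by name: the statement is the Claim_ definition above) =====
theorem convert_to_past_tense_spec : Claim_equal_convert_to_past_tense := by
  intro sections _ hpre
  show convert_to_past_tense sections = convert_to_past_tense_alt sections
  rw [convert_to_past_tense, convert_to_past_tense_alt, pvFoldAppend, pvFoldAppend]
  simp only [List.nil_append]
  apply List.map_congr_left
  intro sec hsec
  exact pvSection sec (hpre sec hsec).1 (hpre sec hsec).2
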